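-- pv_equiv track=rewrite | github.com/bolozna/Events | eventpy/features.py | _get_inter_event_times_seq
-- ===== SOURCE A (Python) =====
-- import itertools
--
-- def _get_inter_event_times_seq(times,durations):
--     r=[]
--     last_time=None
--     for time,duration in itertools.izip(times,durations):
--         if last_time!=None:
--             r.append(time-last_time)
--         last_time=time+duration
--     return r
-- ===== SOURCE B (Python) =====
-- def _get_inter_event_times_seq(times, durations):
--     n = min(len(times), len(durations))
--     r = []
--     for i in range(n - 1, 0, -1):
--         r.append(times[i] - times[i - 1] - durations[i - 1])
--     r.reverse()
--     return r
-- ===== Notes on version B (the rewrite author's own statement) =====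
-- stated objective: alternative
-- what changed: Replaced A's stateful zip loop threading a last_time accumulator with a None guard by index arithmetic: truncate to the shorter length up front, build the gaps back-to-front with a descending index loop computing times[i]-times[i-1]-durations[i-1], then reverse.
import Mathlib
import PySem

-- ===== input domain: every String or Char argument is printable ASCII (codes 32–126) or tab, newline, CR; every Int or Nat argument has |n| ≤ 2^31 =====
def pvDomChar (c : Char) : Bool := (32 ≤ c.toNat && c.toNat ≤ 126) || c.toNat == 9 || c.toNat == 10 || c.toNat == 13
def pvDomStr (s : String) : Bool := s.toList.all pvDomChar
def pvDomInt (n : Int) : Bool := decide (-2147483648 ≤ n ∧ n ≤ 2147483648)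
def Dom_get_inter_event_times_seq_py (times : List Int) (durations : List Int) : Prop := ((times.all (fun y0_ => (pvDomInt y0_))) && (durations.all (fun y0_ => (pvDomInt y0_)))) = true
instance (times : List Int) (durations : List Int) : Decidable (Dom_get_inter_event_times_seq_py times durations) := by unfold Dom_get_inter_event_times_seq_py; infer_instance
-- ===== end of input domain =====

-- B replaces A's stateful zip loop (last_time accumulator + None guard) by index arithmetic:
-- truncate to the shorter length, build the gaps back-to-front with a descending index loop, then reverse; same cost, different decomposition.


-- ===== PORT A =====
-- loop body of A: state = (r, last_time); last_time is Option Int as in Python's None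
def pvAStep (st : List Int × Option Int) (p : Int × Int) : List Int × Option Int :=
  (match st.2 with
   | none => st.1
   | some lt => st.1 ++ [p.1 - lt],
   some (p.1 + p.2))

def get_inter_event_times_seq_py (times : List Int) (durations : List Int) : List Int :=
  ((times.zip durations).foldl pvAStep ([], none)).1

-- ===== PORT B =====
-- indices i and i-1 always lie in range here (1 ≤ i ≤ n-1 < min length), so pyGetD's default is never used
def get_inter_event_times_seq_py_alt (times : List Int) (durations : List Int) : List Int :=
  let n : Int := min (times.length : Int) (durations.length : Int)
  ((PySem.List.pyRange (n - 1) 0 (-1)).foldl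
      (fun r i => r ++ [PySem.List.pyGetD times i 0 - PySem.List.pyGetD times (i - 1) 0
                        - PySem.List.pyGetD durations (i - 1) 0]) []).reverse

-- ===== PRECONDITION & SPEC =====
def Spec_get_inter_event_times_seq_py (times : List Int) (durations : List Int) (out : List Int) : Prop := out = get_inter_event_times_seq_py_alt times durations
instance (times : List Int) (durations : List Int) (out : List Int) : Decidable (Spec_get_inter_event_times_seq_py times durations out) := by unfold Spec_get_inter_event_times_seq_py; infer_instance

-- ===== CLAIM (what is proved, stated in full; the proofs are below) =====
def Claim_equal_get_inter_event_times_seq_py : Prop := ∀ (times : List Int) (durations : List Int), Dom_get_inter_event_times_seq_py times durations → Spec_get_inter_event_times_seq_py times durations (get_inter_event_times_seq_py times durations)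

-- ===== LEMMAS AND PROOFS =====

-- pvG lt xs: what the A-loop appends once last_time = some lt
def pvG (lt : Int) : List (Int × Int) → List Int
  | [] => []
  | (t, d) :: rest => (t - lt) :: pvG (t + d) rest

theorem pvFold_some (xs : List (Int × Int)) : ∀ (acc : List Int) (lt : Int),
    (xs.foldl pvAStep (acc, some lt)).1 = acc ++ pvG lt xs := by
  induction xs with
  | nil => intro acc lt; simp [pvG]
  | cons p rest ih =>
      intro acc lt
      simp [List.foldl, pvAStep, pvG, ih, List.append_assoc]

-- the list A appends, written by index over the untruncated inputs
theorem pvG_index : ∀ (ts ds : List Int) (t d : Int),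
    pvG (t + d) (ts.zip ds)
      = (List.range (min ts.length ds.length)).map
          (fun k => (t :: ts).getD (k + 1) 0 - (t :: ts).getD k 0 - (d :: ds).getD k 0) := by
  intro ts
  induction ts with
  | nil => intro ds t d; simp [pvG]
  | cons t2 ts' ih =>
      intro ds t d
      cases ds with
      | nil => simp [pvG]
      | cons d2 ds' =>
          simp only [List.zip_cons_cons, pvG, List.length_cons, Nat.succ_min_succ,
            List.range_succ_eq_map, List.map_cons, List.map_map]
          congr 1
          · simp; ring
          · rw [ih ds' t2 d2]
            apply List.map_congr_left
            intro k _
            simp [Function.comp]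

theorem main_index (ts ds : List Int) :
    get_inter_event_times_seq_py ts ds
      = (List.range (min ts.length ds.length - 1)).map
          (fun k => ts.getD (k + 1) 0 - ts.getD k 0 - ds.getD k 0) := by
  cases ts with
  | nil => simp [get_inter_event_times_seq_py]
  | cons t ts' =>
      cases ds with
      | nil => simp [get_inter_event_times_seq_py]
      | cons d ds' =>
          unfold get_inter_event_times_seq_py
          simp only [List.zip_cons_cons, List.foldl_cons, pvAStep]
          rw [pvFold_some ((ts').zip ds') [] (t + d)]
          simp only [List.nil_append, List.length_cons, Nat.succ_min_succ,
            Nat.succ_sub_one]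
          exact pvG_index ts' ds' t d

theorem alt_index (ts ds : List Int) :
    get_inter_event_times_seq_py_alt ts ds
      = (List.range (min ts.length ds.length - 1)).map
          (fun k => ts.getD (k + 1) 0 - ts.getD k 0 - ds.getD k 0) := by
  simp only [get_inter_event_times_seq_py_alt]
  rw [PySem.List.foldl_append_singleton_eq_map, PySem.List.pyRange_neg_one_eq_reverse]
  simp only [List.nil_append, List.map_reverse, List.reverse_reverse]
  rw [show ((0 : Int) + 1) = 1 by norm_num]
  rw [show (min (ts.length : Int) (ds.length : Int) - 1 + 1) = min (ts.length : Int) (ds.length : Int) by ring]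
  rw [PySem.List.pyRange_one]
  have hlen : ((min (ts.length : Int) (ds.length : Int)) - 1).toNat
      = min ts.length ds.length - 1 := by
    omega
  rw [hlen, List.map_map]
  apply List.map_congr_left
  intro k _
  have h1 : (1 : Int) + (k : Int) = ((k + 1 : Nat) : Int) := by push_cast; ring
  have h2 : ((k + 1 : Nat) : Int) - 1 = ((k : Nat) : Int) := by push_cast; ring
  simp only [Function.comp]
  rw [h1, h2]
  simp only [PySem.List.pyGetD_natCast]

-- ===== VERDICT (by name: the statement is the Claim_ definition above) =====
theorem get_inter_event_times_seq_py_spec : Claim_equal_get_inter_event_times_seq_py := by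
  intro ts ds _
  unfold Spec_get_inter_event_times_seq_py
  rw [main_index, alt_index]
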